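-- pv_equiv track=rewrite | github.com/redpiigpig/know-graph-lab | scripts/split_ebook_set.py | group_by_volume
-- ===== SOURCE A (Python) =====
-- def group_by_volume(chunks: list[dict]) -> list[tuple[str, list[dict]]]:
--     """Group chunks into volume buckets, preserving document order.
--
--     Volume=None chunks attach to the FOLLOWING real volume if no real volume
--     has appeared yet (frontmatter), else to the PRECEDING volume (trailing).
--     """
--     # Find the first real volume — chunks before it are "pending frontmatter"
--     first_real_idx = next(
--         (i for i, c in enumerate(chunks) if c.get("volume")),
--         None
--     )
--     if first_real_idx is None:
--         return []  # nothing real to group on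
--     groups: list[tuple[str, list[dict]]] = []
--     current_name: str | None = None
--     current_bucket: list[dict] = []
--     # Frontmatter (before first volume) prepended to first volume's bucket
--     pending_frontmatter = chunks[:first_real_idx]
--     for c in chunks[first_real_idx:]:
--         v = c.get("volume")
--         if v and v != current_name:
--             # New volume starts — close previous bucket
--             if current_name is not None:
--                 groups.append((current_name, current_bucket))
--             current_name = v
--             current_bucket = []
--             if not groups and pending_frontmatter:
--                 # First volume — prepend the frontmatter chunks
--                 current_bucket.extend(pending_frontmatter)
--                 pending_frontmatter = []
--             current_bucket.append(c)
--         else: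
--             # Continuation of current volume OR volume=None mid-doc (trailing
--             # matter of the previous volume's last chunk).
--             current_bucket.append(c)
--     if current_name is not None:
--         groups.append((current_name, current_bucket))
--     return groups
-- ===== SOURCE B (Python) =====
-- def group_by_volume(chunks: list[dict]) -> list[tuple[str, list[dict]]]:
--     """Label each chunk with its volume (forward-fill, backfill frontmatter),
--     then group consecutive equal labels."""
--     # Pass 1: forward-fill labels from the most recent truthy volume.
--     labels = []
--     cur = None
--     for c in chunks:
--         v = c.get("volume")
--         if v:
--             cur = v
--         labels.append(cur)
--     if cur is None:
--         return []  # no real volume anywhere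
--     # Backfill leading frontmatter with the first real volume's name.
--     first = next(l for l in labels if l is not None)
--     labels = [first if l is None else l for l in labels]
--     # Pass 2: bucket consecutive runs of equal labels.
--     groups: list[tuple[str, list[dict]]] = []
--     for c, l in zip(chunks, labels):
--         if groups and groups[-1][0] == l:
--             groups[-1][1].append(c)
--         else:
--             groups.append((l, [c]))
--     return groups
-- ===== Notes on version B (the rewrite author's own statement) =====
-- stated objective: simpler
-- what changed: Replaces A's single stateful loop (current-name/current-bucket/pending-frontmatter bookkeeping plus a trailing flush) by two plain passes: forward-fill a per-chunk volume label (backfilling leading frontmatter with the first real volume), then group consecutive equal labels.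
import Mathlib
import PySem

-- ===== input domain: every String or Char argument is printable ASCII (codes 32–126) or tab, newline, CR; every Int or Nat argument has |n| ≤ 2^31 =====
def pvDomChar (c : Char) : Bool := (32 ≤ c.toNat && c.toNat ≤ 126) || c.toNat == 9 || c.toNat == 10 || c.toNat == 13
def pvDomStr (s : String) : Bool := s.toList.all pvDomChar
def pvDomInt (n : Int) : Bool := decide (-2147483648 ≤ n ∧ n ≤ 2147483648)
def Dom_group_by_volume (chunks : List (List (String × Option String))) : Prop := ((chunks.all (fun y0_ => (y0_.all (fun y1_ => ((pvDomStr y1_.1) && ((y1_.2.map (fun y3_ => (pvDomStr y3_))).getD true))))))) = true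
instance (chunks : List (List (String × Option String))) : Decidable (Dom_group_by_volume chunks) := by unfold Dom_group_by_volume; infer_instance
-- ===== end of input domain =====

-- B builds per-chunk volume labels in one forward-fill pass (backfilling leading
-- frontmatter) and then groups consecutive equal labels, instead of A's single
-- stateful loop with pending-frontmatter bookkeeping; objective: simpler decomposition.

abbrev PvChunk := List (String × Option String)

-- shared port of `v = c.get("volume")` combined with Python truthiness of v
-- (missing key, None and "" are all falsy): some s ↔ v is a truthy string s.
def getVolume (c : PvChunk) : Option String :=
  match c.find? (fun kv => kv.1 == "volume") with
  | some (_, some s) => if s == "" then none else some s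
  | _ => none

-- ===== PORT A =====
-- loop body of A's for-loop; state = (groups, current_name, current_bucket, pending_frontmatter)
def pvStepA (st : List (String × List PvChunk) × Option String × List PvChunk × List PvChunk)
    (c : PvChunk) : List (String × List PvChunk) × Option String × List PvChunk × List PvChunk :=
  match st with
  | (groups, current_name, bucket, pending) =>
    match getVolume c with
    | some v =>
      if some v = current_name then
        (groups, current_name, bucket ++ [c], pending)
      else
        let groups := match current_name with
          | some n => groups ++ [(n, bucket)]
          | none => groups
        let (bucket, pending) :=
          if groups.isEmpty && !pending.isEmpty then (pending, ([] : List PvChunk))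
          else (([] : List PvChunk), pending)
        (groups, some v, bucket ++ [c], pending)
    | none => (groups, current_name, bucket ++ [c], pending)

-- the trailing `if current_name is not None: groups.append(...)`
def pvFinA (st : List (String × List PvChunk) × Option String × List PvChunk × List PvChunk) :
    List (String × List PvChunk) :=
  match st with
  | (groups, some n, bucket, _) => groups ++ [(n, bucket)]
  | (groups, none, _, _) => groups

def group_by_volume (chunks : List (List (String × Option String))) : List (String × (List (List (String × Option String)))) :=
  match chunks.findIdx? (fun c => (getVolume c).isSome) with
  | none => []
  | some i =>
    pvFinA ((chunks.drop i).foldl pvStepA ([], none, [], chunks.take i))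

-- ===== PORT B =====
-- pass-1 body: forward-fill the running label
def pvStepL (st : List (Option String) × Option String) (c : PvChunk) :
    List (Option String) × Option String :=
  let cur := match getVolume c with
    | some v => some v
    | none => st.2
  (st.1 ++ [cur], cur)

-- pass-2 body: extend the last bucket on an equal label, else open a new one
def pvStepG (groups : List (String × List PvChunk)) (cl : PvChunk × String) :
    List (String × List PvChunk) :=
  match groups.getLast? with
  | some (n, b) =>
    if n = cl.2 then groups.dropLast ++ [(n, b ++ [cl.1])]
    else groups ++ [(cl.2, [cl.1])]
  | none => [(cl.2, [cl.1])]

def group_by_volume_alt (chunks : List (List (String × Option String))) : List (String × (List (List (String × Option String)))) :=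
  let st := chunks.foldl pvStepL ([], none)
  match st.2 with
  | none => []
  | some _ =>
    let first := ((st.1.find? (fun l => l.isSome)).getD none).getD ""
    let labels := st.1.map (fun l => match l with | none => first | some s => s)
    (chunks.zip labels).foldl pvStepG []

-- ===== PRECONDITION & SPEC =====
def Spec_group_by_volume (chunks : List (List (String × Option String))) (out : List (String × (List (List (String × Option String))))) : Prop := out = group_by_volume_alt chunks
instance (chunks : List (List (String × Option String))) (out : List (String × (List (List (String × Option String))))) : Decidable (Spec_group_by_volume chunks out) := by unfold Spec_group_by_volume; infer_instance

-- ===== CLAIM (what is proved, stated in full; the proofs are below) =====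
def Claim_equal_group_by_volume : Prop := ∀ (chunks : List (List (String × Option String))), Dom_group_by_volume chunks → Spec_group_by_volume chunks (group_by_volume chunks)

-- ===== LEMMAS AND PROOFS =====

-- canonical consecutive grouping both sides reduce to
def pvCanon (name : String) (bucket : List PvChunk) : List PvChunk → List (String × List PvChunk)
  | [] => [(name, bucket)]
  | c :: cs =>
    match getVolume c with
    | some v => if v = name then pvCanon name (bucket ++ [c]) cs else (name, bucket) :: pvCanon v [c] cs
    | none => pvCanon name (bucket ++ [c]) cs

def pvOLabel (cur : Option String) : List PvChunk → List (Option String)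
  | [] => []
  | c :: cs =>
    let cur' := match getVolume c with | some v => some v | none => cur
    cur' :: pvOLabel cur' cs

def pvOLast (cur : Option String) : List PvChunk → Option String
  | [] => cur
  | c :: cs => pvOLast (match getVolume c with | some v => some v | none => cur) cs

def pvSLabel (cur : String) : List PvChunk → List String
  | [] => []
  | c :: cs =>
    let cur' := (getVolume c).getD cur
    cur' :: pvSLabel cur' cs

def pvCanonZip (n : String) (b : List PvChunk) : List (PvChunk × String) → List (String × List PvChunk)
  | [] => [(n, b)]
  | (c, l) :: ps => if l = n then pvCanonZip n (b ++ [c]) ps else (n, b) :: pvCanonZip l [c] ps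
lemma foldA_inv (cs : List PvChunk) : ∀ (groups : List (String × List PvChunk)) name bucket,
    pvFinA (cs.foldl pvStepA (groups, some name, bucket, [])) = groups ++ pvCanon name bucket cs := by
  induction cs with
  | nil => intro groups name bucket; simp [pvFinA, pvCanon]
  | cons c cs ih =>
    intro groups name bucket
    simp only [List.foldl_cons, pvStepA, pvCanon]
    cases h : getVolume c with
    | none => simp [ih]
    | some v =>
      by_cases hv : v = name
      · simp [hv, ih]
      · have : ¬ (some v = some name) := by simp [hv]
        simp [hv, this, ih]
lemma foldL_inv (cs : List PvChunk) : ∀ labels0 cur,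
    cs.foldl pvStepL (labels0, cur) = (labels0 ++ pvOLabel cur cs, pvOLast cur cs) := by
  induction cs with
  | nil => intro labels0 cur; simp [pvOLabel, pvOLast]
  | cons c cs ih =>
    intro labels0 cur
    simp only [List.foldl_cons, pvStepL, pvOLabel, pvOLast]
    cases getVolume c <;> simp [ih]

lemma oLabel_append (xs ys : List PvChunk) : ∀ cur,
    pvOLabel cur (xs ++ ys) = pvOLabel cur xs ++ pvOLabel (pvOLast cur xs) ys := by
  induction xs with
  | nil => intro cur; simp [pvOLabel, pvOLast]
  | cons c cs ih => intro cur; simp only [List.cons_append, pvOLabel, pvOLast]; simp [ih]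

lemma oLast_append (xs ys : List PvChunk) : ∀ cur,
    pvOLast cur (xs ++ ys) = pvOLast (pvOLast cur xs) ys := by
  induction xs with
  | nil => intro cur; simp [pvOLast]
  | cons c cs ih => intro cur; simp only [List.cons_append, pvOLast]; simp [ih]

lemma oLabel_falsy (xs : List PvChunk) (h : ∀ c ∈ xs, getVolume c = none) :
    pvOLabel none xs = List.replicate xs.length none := by
  induction xs with
  | nil => simp [pvOLabel]
  | cons c cs ih =>
    simp only [pvOLabel, h c (by simp), List.length_cons, List.replicate_succ]
    simp [ih (fun x hx => h x (by simp [hx]))]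

lemma oLast_falsy (xs : List PvChunk) (h : ∀ c ∈ xs, getVolume c = none) :
    pvOLast none xs = none := by
  induction xs with
  | nil => simp [pvOLast]
  | cons c cs ih =>
    simp only [pvOLast, h c (by simp)]
    exact ih (fun x hx => h x (by simp [hx]))

lemma oLabel_some (xs : List PvChunk) : ∀ x, pvOLabel (some x) xs = (pvSLabel x xs).map some := by
  induction xs with
  | nil => intro x; simp [pvOLabel, pvSLabel]
  | cons c cs ih =>
    intro x
    simp only [pvOLabel, pvSLabel]
    cases getVolume c <;> simp [ih]

lemma oLast_some (xs : List PvChunk) : ∀ x, ∃ y, pvOLast (some x) xs = some y := by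
  induction xs with
  | nil => intro x; exact ⟨x, rfl⟩
  | cons c cs ih =>
    intro x
    simp only [pvOLast]
    cases getVolume c <;> simp <;> apply ih

lemma foldG_inv (ps : List (PvChunk × String)) : ∀ (groups : List (String × List PvChunk)) n b,
    ps.foldl pvStepG (groups ++ [(n, b)]) = groups ++ pvCanonZip n b ps := by
  induction ps with
  | nil => intro groups n b; simp [pvCanonZip]
  | cons p ps ih =>
    intro groups n b
    obtain ⟨c, l⟩ := p
    simp only [List.foldl_cons, pvStepG, pvCanonZip, List.getLast?_concat, List.dropLast_concat]
    by_cases hl : l = n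
    · simp [hl, ih]
    · have : ¬ (n = l) := fun h => hl h.symm
      simp only [this, hl, if_false]
      rw [show groups ++ [(n,b)] ++ [(l,[c])] = (groups ++ [(n,b)]) ++ [(l,[c])] by simp, ih]
      simp

lemma canonZip_zip (cs : List PvChunk) : ∀ n b,
    pvCanonZip n b (cs.zip (pvSLabel n cs)) = pvCanon n b cs := by
  induction cs with
  | nil => intro n b; simp [pvSLabel, pvCanonZip, pvCanon]
  | cons c cs ih =>
    intro n b
    simp only [pvSLabel, pvCanon, List.zip_cons_cons, pvCanonZip]
    cases getVolume c with
    | none => simp [ih]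
    | some v =>
      by_cases hv : v = n
      · simp [hv, ih]
      · simp [hv, ih]

lemma foldG_front (ds : List PvChunk) : ∀ (ps : List (PvChunk × String)) groups (v : String) b,
    ((ds.map (fun c => (c, v)) ++ ps).foldl pvStepG (groups ++ [(v, b)])) =
      ps.foldl pvStepG (groups ++ [(v, b ++ ds)]) := by
  induction ds with
  | nil => intro ps groups v b; simp
  | cons d ds ih =>
    intro ps groups v b
    simp only [List.map_cons, List.cons_append, List.foldl_cons, pvStepG,
      List.getLast?_concat, List.dropLast_concat, ite_true]
    rw [ih]
    simp

lemma foldG_all (ds : List PvChunk) (hne : ds ≠ []) (v : String) (ps : List (PvChunk × String)) :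
    (ds.map (fun c => (c, v)) ++ ps).foldl pvStepG [] = ps.foldl pvStepG [(v, ds)] := by
  obtain ⟨d, ds', rfl⟩ := List.exists_cons_of_ne_nil hne
  simp only [List.map_cons, List.cons_append, List.foldl_cons]
  have h1 : pvStepG [] (d, v) = [] ++ [(v, [d])] := by simp [pvStepG]
  rw [h1, foldG_front]
  simp

lemma findIdx?_split (p : PvChunk → Bool) : ∀ (l : List PvChunk) (i : Nat), l.findIdx? p = some i →
    (∀ x ∈ l.take i, ¬ p x) ∧ ∃ c rest, l.drop i = c :: rest ∧ p c := by
  intro l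
  induction l with
  | nil => intro i h; simp at h
  | cons c cs ih =>
    intro i h
    rw [List.findIdx?_cons] at h
    by_cases hp : p c
    · simp [hp] at h
      subst h
      exact ⟨by simp, c, cs, by simp, hp⟩
    · simp [hp] at h
      obtain ⟨j, hj, rfl⟩ := h
      obtain ⟨h1, c', rest, h2, h3⟩ := ih j hj
      refine ⟨?_, c', rest, by simpa using h2, h3⟩
      intro x hx
      simp [List.take_succ_cons] at hx
      rcases hx with rfl | hx
      · exact hp
      · exact h1 x hx
lemma zip_replicate_aux (xs : List PvChunk) (v : String) :
    xs.zip (List.replicate xs.length v) = xs.map (fun c => (c, v)) := by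
  induction xs with
  | nil => simp
  | cons x xs ih => simp [List.replicate_succ, ih]

lemma pv_main : ∀ chunks, group_by_volume chunks = group_by_volume_alt chunks := by
  intro chunks
  cases h : chunks.findIdx? (fun c => (getVolume c).isSome) with
  | none =>
    have hall : ∀ c ∈ chunks, getVolume c = none := by
      simp [List.findIdx?_eq_none_iff] at h
      intro c hc
      have := h c hc
      cases hv : getVolume c
      · rfl
      · simp [hv] at this
    have hlast : pvOLast none chunks = none := oLast_falsy chunks hall
    simp [group_by_volume, h, group_by_volume_alt, foldL_inv, hlast]
  | some i =>
    obtain ⟨h1, c0, rest, h2, h3⟩ := findIdx?_split _ chunks i h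
    obtain ⟨v0, hv0⟩ := Option.isSome_iff_exists.mp h3
    set pend := chunks.take i with hpenddef
    have hpend : ∀ x ∈ pend, getVolume x = none := by
      intro x hx
      have := h1 x hx
      cases hv : getVolume x
      · rfl
      · simp [hv] at this
    have hchunks : chunks = pend ++ c0 :: rest := by rw [hpenddef, ← h2, List.take_append_drop]
    -- A side
    have hstep : pvStepA ([], none, [], pend) c0 = ([], some v0, pend ++ [c0], []) := by
      by_cases hp : pend = [] <;> simp [pvStepA, hv0, hp]
    have hA : group_by_volume chunks = pvCanon v0 (pend ++ [c0]) rest := by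
      simp only [group_by_volume, h, h2, List.foldl_cons]
      rw [← hpenddef, hstep, foldA_inv]
      simp
    -- B side
    have hOlabel : pvOLabel none chunks =
        List.replicate pend.length none ++ some v0 :: (pvSLabel v0 rest).map some := by
      conv_lhs => rw [hchunks]
      rw [oLabel_append, oLast_falsy _ hpend, oLabel_falsy _ hpend]
      simp [pvOLabel, hv0, oLabel_some]
    obtain ⟨y, hy⟩ : ∃ y, pvOLast none chunks = some y := by
      rw [hchunks, oLast_append, oLast_falsy _ hpend]
      simp only [pvOLast, hv0]
      exact oLast_some rest v0
    have hfind : ((pvOLabel none chunks).find? (fun l => l.isSome)) = some (some v0) := by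
      rw [hOlabel, List.find?_append]
      simp
    have hlabels : (pvOLabel none chunks).map
        (fun l => match l with | none => v0 | some s => s) =
        List.replicate pend.length v0 ++ v0 :: pvSLabel v0 rest := by
      rw [hOlabel]
      simp [List.map_map, Function.comp_def]
    have hzip : chunks.zip (List.replicate pend.length v0 ++ v0 :: pvSLabel v0 rest) =
        (pend ++ [c0]).map (fun c => (c, v0)) ++ rest.zip (pvSLabel v0 rest) := by
      conv_lhs => rw [hchunks,
        show pend ++ c0 :: rest = (pend ++ [c0]) ++ rest by simp,
        show List.replicate pend.length v0 ++ v0 :: pvSLabel v0 rest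
           = (List.replicate pend.length v0 ++ [v0]) ++ pvSLabel v0 rest by simp]
      rw [List.zip_append (by simp)]
      rw [show List.replicate pend.length v0 ++ [v0] = List.replicate (pend ++ [c0]).length v0 by
        simp [List.replicate_succ']]
      rw [zip_replicate_aux]
    have hB : group_by_volume_alt chunks = pvCanon v0 (pend ++ [c0]) rest := by
      simp only [group_by_volume_alt, foldL_inv, List.nil_append, hy, hfind, Option.getD_some]
      rw [hlabels, hzip, foldG_all _ (by simp), ← List.nil_append [(v0, pend ++ [c0])],
        foldG_inv, canonZip_zip]
      simp
    rw [hA, hB]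

-- ===== VERDICT (by name: the statement is the Claim_ definition above) =====
theorem group_by_volume_spec : Claim_equal_group_by_volume := by
  intro chunks _
  unfold Spec_group_by_volume
  exact pv_main chunks
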